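-- pv_equiv track=rewrite | github.com/komikndr/raylight | src/raylight/comfy_dist/fsdp_utils.py | _add_ancestors_to_root
-- ===== SOURCE A (Python) =====
-- def _add_ancestors_to_root(targets: set[str]) -> set[str]:
--     out = set(targets)
--     for target in list(targets):
--         cur = target
--         while "." in cur:
--             cur = cur.rsplit(".", 1)[0]
--             out.add(cur)
--     out.add("")
--     return out
-- ===== SOURCE B (Python) =====
-- def _add_ancestors_to_root(targets: set[str]) -> set[str]:
--     out = set(targets)
--     for t in targets:
--         for j in reversed(range(len(t))):
--             if t[j] == ".":
--                 out.add(t[:j])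
--     out.add("")
--     return out
-- ===== Notes on version B (the rewrite author's own statement) =====
-- stated objective: alternative
-- what changed: Replaces the while-loop that repeatedly rsplits a shrinking string with a single right-to-left character scan per target that adds the prefix before each '.' directly.
import Mathlib
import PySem

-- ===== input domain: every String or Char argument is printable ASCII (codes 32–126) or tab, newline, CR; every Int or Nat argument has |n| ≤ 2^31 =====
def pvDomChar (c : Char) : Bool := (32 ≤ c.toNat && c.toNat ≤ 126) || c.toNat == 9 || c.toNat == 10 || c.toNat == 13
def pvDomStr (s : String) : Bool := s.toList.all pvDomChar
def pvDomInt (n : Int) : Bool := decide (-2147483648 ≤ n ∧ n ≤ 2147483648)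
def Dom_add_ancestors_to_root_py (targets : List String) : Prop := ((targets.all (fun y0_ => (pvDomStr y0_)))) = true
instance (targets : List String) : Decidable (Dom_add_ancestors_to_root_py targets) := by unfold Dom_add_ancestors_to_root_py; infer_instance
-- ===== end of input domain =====

-- B replaces A's while-loop of repeated rsplit over a shrinking string by one right-to-left
-- character scan per target that adds the prefix before each '.'; same return value, no side effects.

-- ===== PORT A =====
-- cur.rsplit(".", 1)[0] for a string containing '.': everything before the LAST '.'.
-- Ported by hand (PySem has no rsplit): reverse, drop up to and including the first '.',
-- reverse back. Exact because the separator is a single character and maxsplit is 1.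
def pvRsplitHead (cs : List Char) : List Char :=
  (((cs.reverse.dropWhile (fun c => c ≠ '.')).drop 1)).reverse

theorem pvRsplitHead_length_lt (cs : List Char)
    (h : PySem.Chars.isIn ['.'] cs = true) : (pvRsplitHead cs).length < cs.length := by
  have hm : '.' ∈ cs := (List.singleton_infix_iff '.' cs).mp ((PySem.Chars.isIn_iff_infix _ _).mp h)
  have hne : cs.reverse.dropWhile (fun c => c ≠ '.') ≠ [] := by
    intro hnil
    have := List.dropWhile_eq_nil_iff.mp hnil '.' (by simpa using hm)
    simp at this
  have hle := List.length_dropWhile_le (p := fun c => c ≠ '.') (l := cs.reverse)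
  have h1 : 1 ≤ (cs.reverse.dropWhile (fun c => c ≠ '.')).length :=
    Nat.one_le_iff_ne_zero.mpr (by simpa [List.length_eq_zero_iff] using hne)
  simp only [pvRsplitHead, List.length_reverse, List.length_drop]
  simp only [List.length_reverse] at hle
  omega

-- the while-loop of A: while "." in cur: cur = cur.rsplit(".",1)[0]; out.add(cur)
def pvWhileA (cs : List Char) (out : PySem.Set String) : PySem.Set String :=
  if _h : PySem.Chars.isIn ['.'] cs = true then
    pvWhileA (pvRsplitHead cs) (PySem.Set.add out (String.ofList (pvRsplitHead cs)))
  else out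
termination_by cs.length
decreasing_by exact pvRsplitHead_length_lt cs _h

def add_ancestors_to_root_py (targets : List String) : List String :=
  let out := PySem.Set.ofList targets
  let out := targets.foldl (fun out t => pvWhileA t.toList out) out
  PySem.Set.add out ""

-- ===== PORT B =====
def add_ancestors_to_root_py_alt (targets : List String) : List String :=
  let out := PySem.Set.ofList targets
  let out := targets.foldl (fun out t =>
    -- for j in reversed(range(len(t))): if t[j] == ".": out.add(t[:j])
    ((PySem.List.pyRange 0 (t.toList.length : Int) 1).reverse).foldl (fun out j =>
      if PySem.Chars.pyGet? t.toList j = some '.' then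
        PySem.Set.add out (String.ofList (PySem.Chars.slice t.toList none (some j)))
      else out) out) out
  PySem.Set.add out ""

-- ===== PRECONDITION & SPEC =====
def Spec_add_ancestors_to_root_py (targets : List String) (out : List String) : Prop := out = add_ancestors_to_root_py_alt targets
instance (targets : List String) (out : List String) : Decidable (Spec_add_ancestors_to_root_py targets out) := by unfold Spec_add_ancestors_to_root_py; infer_instance

-- ===== CLAIM (what is proved, stated in full; the proofs are below) =====
def Claim_equal_add_ancestors_to_root_py : Prop := ∀ (targets : List String), Dom_add_ancestors_to_root_py targets → Spec_add_ancestors_to_root_py targets (add_ancestors_to_root_py targets)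

-- ===== LEMMAS AND PROOFS =====

-- common form of both inner loops: visit indices k-1, k-2, …, 0; add cs.take j at each dot
def dotFold (cs : List Char) (k : Nat) (out : PySem.Set String) : PySem.Set String :=
  match k with
  | 0 => out
  | k + 1 =>
    dotFold cs k (if cs[k]? = some '.' then PySem.Set.add out (String.ofList (cs.take k)) else out)

theorem dotFold_of_no_dot_above (cs : List Char) (k₀ : Nat) :
    ∀ (k : Nat), k₀ ≤ k → (∀ i, k₀ ≤ i → cs[i]? ≠ some '.') →
      ∀ out, dotFold cs k out = dotFold cs k₀ out := by
  intro k
  induction k with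
  | zero => intro h _ out; simp [Nat.le_zero.mp h]
  | succ k ih =>
    intro hk hnd out
    rcases Nat.lt_or_ge k₀ (k + 1) with hlt | hge
    · have hk' : k₀ ≤ k := Nat.lt_succ_iff.mp hlt
      have : cs[k]? ≠ some '.' := hnd k hk'
      simp [dotFold, this, ih hk' hnd out]
    · rw [Nat.le_antisymm hge hk]

theorem dotFold_eq_of_take_eq (cs cs' : List Char) :
    ∀ (k : Nat), cs.take k = cs'.take k → ∀ out, dotFold cs k out = dotFold cs' k out := by
  intro k
  induction k with
  | zero => intro _ out; rfl
  | succ k ih =>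
    intro h out
    have htk : cs.take k = cs'.take k := by
      have := congrArg (List.take k) h
      simpa [List.take_take, Nat.min_def, Nat.le_succ] using this
    have hgk : cs[k]? = cs'[k]? := by
      have h1 := congrArg (fun l => l[k]?) h
      simpa [List.getElem?_take, Nat.lt_succ_self] using h1
    simp only [dotFold, hgk, htk]
    exact ih htk _

-- the decomposition behind one rsplit step: cs with a dot is a ++ '.' :: b with no dot in b
theorem rsplit_decomp (cs : List Char) (h : '.' ∈ cs) :
    ∃ a b, cs = a ++ '.' :: b ∧ ('.' ∉ b) ∧ pvRsplitHead cs = a := by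
  set q : Char → Bool := fun c => c ≠ '.' with hq
  have hsplit := List.takeWhile_append_dropWhile (p := q) (l := cs.reverse)
  have hne : cs.reverse.dropWhile q ≠ [] := by
    intro hnil
    have := List.dropWhile_eq_nil_iff.mp hnil '.' (by simpa using h)
    simp [hq] at this
  obtain ⟨d, rest, hd⟩ := List.exists_cons_of_ne_nil hne
  have hdq : q d = false := by
    have := List.head_dropWhile_not (p := q) (l := cs.reverse) hne
    simpa [hd] using this
  have hdd : d = '.' := by simpa [hq] using hdq
  refine ⟨rest.reverse, (cs.reverse.takeWhile q).reverse, ?_, ?_, ?_⟩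
  · have h2 : cs.reverse.takeWhile q ++ '.' :: rest = cs.reverse := by
      rw [← hdd, ← hd]; exact hsplit
    simpa using congrArg List.reverse h2.symm
  · intro hmem
    have := List.mem_takeWhile_imp (List.mem_reverse.mp hmem)
    simp [hq] at this
  · show (((cs.reverse.dropWhile q).drop 1)).reverse = rest.reverse
    rw [hd]
    simp

theorem isIn_dot_iff (cs : List Char) : PySem.Chars.isIn ['.'] cs = true ↔ '.' ∈ cs := by
  rw [PySem.Chars.isIn_iff_infix]
  exact List.singleton_infix_iff '.' cs

-- A's while-loop is the descending dot scan
theorem pvWhileA_eq_dotFold (cs : List Char) :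
    ∀ out, pvWhileA cs out = dotFold cs cs.length out := by
  induction hn : cs.length using Nat.strong_induction_on generalizing cs with
  | _ n ih =>
  intro out
  by_cases h : PySem.Chars.isIn ['.'] cs = true
  · obtain ⟨a, b, hcs, hb, hhead⟩ := rsplit_decomp cs ((isIn_dot_iff cs).mp h)
    rw [pvWhileA, dif_pos h, hhead]
    have hlen : cs.length = a.length + 1 + b.length := by simp [hcs]; omega
    have hnd : ∀ i, a.length + 1 ≤ i → cs[i]? ≠ some '.' := by
      intro i hi hdot
      have hilt : i < cs.length := by
        by_contra hge
        rw [List.getElem?_eq_none (by omega)] at hdot; simp at hdot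
      have : cs[i]? = b[i - (a.length + 1)]? := by
        rw [hcs]
        rw [List.getElem?_append_right (by omega)]
        have : i - a.length = (i - (a.length + 1)) + 1 := by omega
        simp [this]
      rw [this] at hdot
      exact hb (List.mem_of_getElem? hdot)
    have hdot_at : cs[a.length]? = some '.' := by
      rw [hcs, List.getElem?_append_right (Nat.le_refl _)]
      simp
    have htake : cs.take a.length = a := by
      rw [hcs, List.take_left' rfl]
    rw [hn] at hlen
    rw [hlen]
    rw [dotFold_of_no_dot_above cs (a.length + 1) (a.length + 1 + b.length) (by omega) hnd]
    show pvWhileA a (PySem.Set.add out (String.ofList a)) = dotFold cs (a.length + 1) out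
    rw [show dotFold cs (a.length + 1) out
        = dotFold cs a.length (PySem.Set.add out (String.ofList a)) by
      simp [dotFold, hdot_at, htake]]
    rw [dotFold_eq_of_take_eq cs a a.length (by simp [htake])]
    exact ih a.length (by omega) a rfl _
  · rw [pvWhileA, dif_neg h]
    have hnd : ∀ i, 0 ≤ i → cs[i]? ≠ some '.' := by
      intro i _ hdot
      exact h ((isIn_dot_iff cs).mpr (List.mem_of_getElem? hdot))
    rw [hn] at *
    rw [dotFold_of_no_dot_above cs 0 n (Nat.zero_le _) hnd]
    rfl

-- B's reversed-range loop is the same descending dot scan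
theorem bFoldRev_eq_dotFold (cs : List Char) :
    ∀ (n : Nat) (out : PySem.Set String),
      (((List.range n).map (fun k : Nat => (k : Int))).reverse).foldl (fun out j =>
        if PySem.Chars.pyGet? cs j = some '.' then
          PySem.Set.add out (String.ofList (PySem.Chars.slice cs none (some j)))
        else out) out = dotFold cs n out := by
  intro n
  induction n with
  | zero => intro out; rfl
  | succ n ih =>
    intro out
    rw [List.range_succ, List.map_append, List.reverse_append]
    simp only [List.map_cons, List.map_nil, List.reverse_cons, List.reverse_nil,
      List.nil_append, List.singleton_append, List.foldl_cons]
    have hget : PySem.Chars.pyGet? cs ((n : Nat) : Int) = cs[n]? := by simp [pysem]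
    have hslice : PySem.Chars.slice cs none (some ((n : Nat) : Int)) = cs.take n := by
      simp [pysem]
    rw [hget, hslice, ih]
    rfl

theorem bInner_eq_dotFold (cs : List Char) (out : PySem.Set String) :
    ((PySem.List.pyRange 0 (cs.length : Int) 1).reverse).foldl (fun out j =>
      if PySem.Chars.pyGet? cs j = some '.' then
        PySem.Set.add out (String.ofList (PySem.Chars.slice cs none (some j)))
      else out) out = dotFold cs cs.length out := by
  rw [PySem.List.pyRange_zero_natCast]
  exact bFoldRev_eq_dotFold cs cs.length out

-- ===== VERDICT (by name: the statement is the Claim_ definition above) =====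
theorem add_ancestors_to_root_py_spec : Claim_equal_add_ancestors_to_root_py := by
  intro targets _
  unfold Spec_add_ancestors_to_root_py
  simp only [add_ancestors_to_root_py, add_ancestors_to_root_py_alt]
  refine congrArg (fun l => PySem.Set.add l "") ?_
  refine PySem.List.foldl_congr_mem _ _ _ _ (fun out t _ => ?_)
  rw [pvWhileA_eq_dotFold, bInner_eq_dotFold]
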